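-- pv_equiv track=rewrite | github.com/FAnzTvDev/ATLAS_CONTROL_SYSTEM | tools/scene_visual_dna.py | detect_room_type
-- ===== SOURCE A (Python) =====
-- def detect_room_type(location: str) -> str:
--     """Detect room type from story bible location string."""
--     loc = location.lower()
--     if any(kw in loc for kw in ["cemetery", "burial", "graveyard"]):
--         return "cemetery"
--     if any(kw in loc for kw in ["library", "bookshelf"]):
--         return "library"
--     if any(kw in loc for kw in ["study", "office"]):
--         return "library"  # study uses library template
--     if any(kw in loc for kw in ["bedroom", "bed", "chamber"]):
--         return "bedroom"
--     if any(kw in loc for kw in ["kitchen", "pantry", "scullery"]):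
--         return "kitchen"
--     if any(kw in loc for kw in ["drawing room", "sitting room", "parlor", "parlour"]):
--         return "drawing_room"
--     if any(kw in loc for kw in ["garden", "exterior", "outside", "driveway", "front drive"]):
--         return "exterior"
--     if any(kw in loc for kw in ["staircase", "landing"]):
--         return "staircase"
--     if any(kw in loc for kw in ["foyer", "entrance", "grand hall", "vestibule", "hallway", "estate"]):
--         return "foyer"
--     return "foyer"  # default
-- ===== SOURCE B (Python) =====
-- # Flat keyword->(priority,label) map: collect all matching keywords in one pass,
-- # then pick the label of the smallest priority (default "foyer").
-- _KEYWORDS = {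
--     "cemetery": (0, "cemetery"), "burial": (0, "cemetery"), "graveyard": (0, "cemetery"),
--     "library": (1, "library"), "bookshelf": (1, "library"),
--     "study": (2, "library"), "office": (2, "library"),
--     "bedroom": (3, "bedroom"), "bed": (3, "bedroom"), "chamber": (3, "bedroom"),
--     "kitchen": (4, "kitchen"), "pantry": (4, "kitchen"), "scullery": (4, "kitchen"),
--     "drawing room": (5, "drawing_room"), "sitting room": (5, "drawing_room"),
--     "parlor": (5, "drawing_room"), "parlour": (5, "drawing_room"),
--     "garden": (6, "exterior"), "exterior": (6, "exterior"), "outside": (6, "exterior"),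
--     "driveway": (6, "exterior"), "front drive": (6, "exterior"),
--     "staircase": (7, "staircase"), "landing": (7, "staircase"),
--     "foyer": (8, "foyer"), "entrance": (8, "foyer"), "grand hall": (8, "foyer"),
--     "vestibule": (8, "foyer"), "hallway": (8, "foyer"), "estate": (8, "foyer"),
-- }
--
--
-- def detect_room_type(location: str) -> str:
--     """Detect room type from story bible location string."""
--     loc = location.lower()
--     hits = [pl for kw, pl in _KEYWORDS.items() if kw in loc]
--     return min(hits, key=lambda h: h[0], default=(9, "foyer"))[1]
-- ===== Notes on version B (the rewrite author's own statement) =====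
-- stated objective: alternative
-- what changed: Replaced the ordered early-return if-chain with a flat keyword->(priority,label) map: B collects ALL matching keywords in one pass and returns the label of the minimum priority (default 'foyer'), instead of testing groups in order and returning at the first hit.
import Mathlib
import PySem

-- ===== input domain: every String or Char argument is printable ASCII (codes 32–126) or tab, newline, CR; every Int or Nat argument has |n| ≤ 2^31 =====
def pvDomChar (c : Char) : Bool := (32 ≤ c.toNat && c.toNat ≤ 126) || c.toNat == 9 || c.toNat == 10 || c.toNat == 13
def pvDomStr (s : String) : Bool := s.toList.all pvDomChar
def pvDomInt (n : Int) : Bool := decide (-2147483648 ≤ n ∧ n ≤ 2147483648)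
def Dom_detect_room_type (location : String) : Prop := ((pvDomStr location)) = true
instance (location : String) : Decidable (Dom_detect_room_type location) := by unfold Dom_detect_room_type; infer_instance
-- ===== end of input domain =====

-- B flattens the nine ordered keyword groups into one keyword -> (priority, label) map,
-- collects ALL matching keywords in a single pass and returns the label of the minimal
-- priority (default "foyer") instead of an ordered early-return chain; same output everywhere.

-- ===== PORT A =====
def detect_room_type (location : String) : String :=
  let loc := PySem.Str.lower location
  if ["cemetery", "burial", "graveyard"].any (fun kw => PySem.Str.isIn kw loc) then "cemetery"
  else if ["library", "bookshelf"].any (fun kw => PySem.Str.isIn kw loc) then "library"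
  else if ["study", "office"].any (fun kw => PySem.Str.isIn kw loc) then "library"
  else if ["bedroom", "bed", "chamber"].any (fun kw => PySem.Str.isIn kw loc) then "bedroom"
  else if ["kitchen", "pantry", "scullery"].any (fun kw => PySem.Str.isIn kw loc) then "kitchen"
  else if ["drawing room", "sitting room", "parlor", "parlour"].any (fun kw => PySem.Str.isIn kw loc) then "drawing_room"
  else if ["garden", "exterior", "outside", "driveway", "front drive"].any (fun kw => PySem.Str.isIn kw loc) then "exterior"
  else if ["staircase", "landing"].any (fun kw => PySem.Str.isIn kw loc) then "staircase"
  else if ["foyer", "entrance", "grand hall", "vestibule", "hallway", "estate"].any (fun kw => PySem.Str.isIn kw loc) then "foyer"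
  else "foyer"

-- ===== PORT B =====
-- the flat _KEYWORDS dict of Source B (insertion order)
def pvKeywords : List (String × Nat × String) :=
  [ ("cemetery", 0, "cemetery"), ("burial", 0, "cemetery"), ("graveyard", 0, "cemetery"),
    ("library", 1, "library"), ("bookshelf", 1, "library"),
    ("study", 2, "library"), ("office", 2, "library"),
    ("bedroom", 3, "bedroom"), ("bed", 3, "bedroom"), ("chamber", 3, "bedroom"),
    ("kitchen", 4, "kitchen"), ("pantry", 4, "kitchen"), ("scullery", 4, "kitchen"),
    ("drawing room", 5, "drawing_room"), ("sitting room", 5, "drawing_room"),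
    ("parlor", 5, "drawing_room"), ("parlour", 5, "drawing_room"),
    ("garden", 6, "exterior"), ("exterior", 6, "exterior"), ("outside", 6, "exterior"),
    ("driveway", 6, "exterior"), ("front drive", 6, "exterior"),
    ("staircase", 7, "staircase"), ("landing", 7, "staircase"),
    ("foyer", 8, "foyer"), ("entrance", 8, "foyer"), ("grand hall", 8, "foyer"),
    ("vestibule", 8, "foyer"), ("hallway", 8, "foyer"), ("estate", 8, "foyer") ]

-- one comparison step of Python's min(..., key=lambda h: h[0]): keep the earlier element on ties
def pvMinPair (a b : Nat × String) : Nat × String :=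
  if b.1 < a.1 then b else a

-- Python's min(l, key=lambda h: h[0], default=d): first element of minimal key, d if l is empty
def pvMinDefault (l : List (Nat × String)) (d : Nat × String) : Nat × String :=
  match l with
  | [] => d
  | x :: xs => xs.foldl pvMinPair x

def detect_room_type_alt (location : String) : String :=
  let loc := PySem.Str.lower location
  let hits := (pvKeywords.filter (fun e => PySem.Str.isIn e.1 loc)).map (fun e => e.2)
  (pvMinDefault hits ((9 : Nat), "foyer")).2

-- ===== PRECONDITION & SPEC =====
def Spec_detect_room_type (location : String) (out : String) : Prop := out = detect_room_type_alt location
instance (location : String) (out : String) : Decidable (Spec_detect_room_type location out) := by unfold Spec_detect_room_type; infer_instance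

-- ===== CLAIM (what is proved, stated in full; the proofs are below) =====
def Claim_equal_detect_room_type : Prop := ∀ (location : String), Dom_detect_room_type location → Spec_detect_room_type location (detect_room_type location)

-- ===== LEMMAS AND PROOFS =====

-- optional min of a list (first element of minimal priority), an option-level min, and a keyword group segment
def pvMin? : List (Nat × String) → Option (Nat × String)
  | [] => none
  | x :: xs => some (xs.foldl pvMinPair x)

def pvOMin : Option (Nat × String) → Option (Nat × String) → Option (Nat × String)
  | none, b => b
  | some a, none => some a
  | some a, some b => some (pvMinPair a b)

def pvSeg (kws : List String) (p : Nat) (lbl : String) : List (String × Nat × String) :=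
  kws.map (fun kw => (kw, p, lbl))

theorem pvMinPair_assoc (a b c : Nat × String) :
    pvMinPair (pvMinPair a b) c = pvMinPair a (pvMinPair b c) := by
  unfold pvMinPair; split_ifs <;> first | rfl | omega

theorem pvFoldl_min (l : List (Nat × String)) :
    ∀ a, some (l.foldl pvMinPair a) = pvOMin (some a) (pvMin? l) := by
  induction l with
  | nil => intro a; rfl
  | cons x xs ih =>
      intro a
      have h1 := ih (pvMinPair a x)
      have h2 := ih x
      simp only [List.foldl_cons, pvMin?]
      cases hx : pvMin? xs with
      | none =>
          rw [hx] at h1 h2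
          simp only [pvOMin] at h1 h2 ⊢
          rw [Option.some_inj] at h1 h2
          rw [h1, h2]
      | some m =>
          rw [hx] at h1 h2
          simp only [pvOMin] at h1 h2 ⊢
          rw [Option.some_inj] at h1 h2
          rw [h1, h2, pvMinPair_assoc]

theorem pvMin?_cons (x : Nat × String) (l : List (Nat × String)) :
    pvMin? (x :: l) = pvOMin (some x) (pvMin? l) := by
  simp only [pvMin?]; exact pvFoldl_min l x

theorem pvMin?_append (l1 l2 : List (Nat × String)) :
    pvMin? (l1 ++ l2) = pvOMin (pvMin? l1) (pvMin? l2) := by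
  cases l1 with
  | nil => rfl
  | cons x xs =>
      simp only [List.cons_append, pvMin?, List.foldl_append, pvOMin]
      rw [pvFoldl_min l2 (xs.foldl pvMinPair x)]
      rfl

theorem pvGroup (kws : List String) (p : Nat) (lbl : String) (loc : String) :
    pvMin? (((pvSeg kws p lbl).filter (fun e => PySem.Str.isIn e.1 loc)).map (fun e => e.2)) =
      if kws.any (fun kw => PySem.Str.isIn kw loc) then some (p, lbl) else none := by
  induction kws with
  | nil => rfl
  | cons k ks ih =>
      simp only [pvSeg, List.map_cons, List.filter_cons, List.any_cons] at ih ⊢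
      by_cases hk : PySem.Str.isIn k loc
      · simp only [hk, if_true, Bool.true_or, List.map_cons]
        rw [pvMin?_cons, ih]
        split <;> simp [pvOMin, pvMinPair]
      · simp only [hk, Bool.false_or]
        simpa using ih

-- decompose the flat table into its nine segments
theorem pvKeywords_eq :
    pvKeywords = pvSeg ["cemetery", "burial", "graveyard"] 0 "cemetery"
      ++ (pvSeg ["library", "bookshelf"] 1 "library"
      ++ (pvSeg ["study", "office"] 2 "library"
      ++ (pvSeg ["bedroom", "bed", "chamber"] 3 "bedroom"
      ++ (pvSeg ["kitchen", "pantry", "scullery"] 4 "kitchen"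
      ++ (pvSeg ["drawing room", "sitting room", "parlor", "parlour"] 5 "drawing_room"
      ++ (pvSeg ["garden", "exterior", "outside", "driveway", "front drive"] 6 "exterior"
      ++ (pvSeg ["staircase", "landing"] 7 "staircase"
      ++ pvSeg ["foyer", "entrance", "grand hall", "vestibule", "hallway", "estate"] 8 "foyer"))))))) := rfl

theorem pvMinDefault_eq (l : List (Nat × String)) (d : Nat × String) :
    pvMinDefault l d = (pvMin? l).getD d := by
  cases l <;> rfl

-- the whole statement as a function of the nine group-match booleans (512 cases, kernel-checked)
theorem pvChain (c0 c1 c2 c3 c4 c5 c6 c7 c8 : Bool) :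
    (if c0 then "cemetery"
     else if c1 then "library"
     else if c2 then "library"
     else if c3 then "bedroom"
     else if c4 then "kitchen"
     else if c5 then "drawing_room"
     else if c6 then "exterior"
     else if c7 then "staircase"
     else if c8 then "foyer"
     else "foyer") =
    ((pvOMin (if c0 then some (((0 : Nat), "cemetery")) else none)
      (pvOMin (if c1 then some (((1 : Nat), "library")) else none)
      (pvOMin (if c2 then some (((2 : Nat), "library")) else none)
      (pvOMin (if c3 then some (((3 : Nat), "bedroom")) else none)
      (pvOMin (if c4 then some (((4 : Nat), "kitchen")) else none)
      (pvOMin (if c5 then some (((5 : Nat), "drawing_room")) else none)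
      (pvOMin (if c6 then some (((6 : Nat), "exterior")) else none)
      (pvOMin (if c7 then some (((7 : Nat), "staircase")) else none)
      (if c8 then some (((8 : Nat), "foyer")) else none))))))))).getD ((9 : Nat), "foyer")).2 := by
  revert c0 c1 c2 c3 c4 c5 c6 c7 c8
  decide

-- ===== VERDICT (by name: the statement is the Claim_ definition above) =====
theorem detect_room_type_spec : Claim_equal_detect_room_type := by
  intro location _
  simp only [Spec_detect_room_type, detect_room_type, detect_room_type_alt, pvMinDefault_eq,
    pvKeywords_eq, List.filter_append, List.map_append, pvMin?_append, pvGroup]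
  exact pvChain _ _ _ _ _ _ _ _ _
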